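-- pv_equiv track=rewrite | github.com/SSAFY-6-1-3/Algorithm | 0928/p_42626_somi.py | solution
-- ===== SOURCE A (Python) =====
-- def solution(scoville, K):
--
--     count = -1
--     while True:
--         # selection_sort(scoville)  # 선택정렬이 더 오래걸림
--         scoville.sort()         # 일단 정렬
--         if scoville[0] < K:     # 가장 작은 값이 K보다 작으면
--             a = scoville.pop(0)
--             b = scoville.pop(0)
--             scoville.append(a + (b * 2))  # 음식 섞기
--             count += 1
--
--         else:  # 모든 음식의 지수가 K이상이면
--             return count + 1  # count 리턴
-- ===== SOURCE B (Python) =====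
-- def _pop(q1, q2, i, j):
--     # smallest of the two non-decreasing queues q1[i:], q2[j:]
--     if i < len(q1) and (j >= len(q2) or q1[i] <= q2[j]):
--         return q1[i], i + 1, j
--     return q2[j], i, j + 1  # IndexError when both queues are exhausted
--
--
-- def solution(scoville, K):
--     # two-queue merge: sorted originals in q1, newly mixed foods appended to q2
--     # (mixes are produced in non-decreasing order), read positions i and j.
--     q1 = sorted(scoville)
--     q2 = []
--     i = j = 0
--     count = 0
--     while True:
--         a, i, j = _pop(q1, q2, i, j)
--         if a >= K:
--             return count
--         b, i, j = _pop(q1, q2, i, j)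
--         q2.append(a + 2 * b)
--         count += 1
-- ===== Notes on version B (the rewrite author's own statement) =====
-- stated objective: faster
-- what changed: A re-sorts the whole list and pops from its front on every mix; B sorts once and then runs a two-queue merge (read pointer over the sorted originals plus a queue of mixes, which are produced in non-decreasing order), so each mix costs O(1).
import Mathlib
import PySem

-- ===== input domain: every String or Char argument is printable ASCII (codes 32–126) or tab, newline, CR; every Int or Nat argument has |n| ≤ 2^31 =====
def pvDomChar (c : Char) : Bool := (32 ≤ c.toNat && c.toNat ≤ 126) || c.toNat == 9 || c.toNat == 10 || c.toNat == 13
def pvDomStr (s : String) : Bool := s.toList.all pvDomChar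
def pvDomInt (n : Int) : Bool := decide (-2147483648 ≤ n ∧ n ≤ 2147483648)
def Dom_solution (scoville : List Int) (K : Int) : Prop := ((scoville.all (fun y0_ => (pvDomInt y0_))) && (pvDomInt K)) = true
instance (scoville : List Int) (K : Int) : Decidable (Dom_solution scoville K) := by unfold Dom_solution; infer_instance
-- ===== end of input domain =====

-- B replaces A's per-iteration full re-sort by one initial sort plus a two-queue merge (objective: faster).
-- Python A sorts/pops/appends its argument in place; the equivalence proved here is about the RETURN value only.

-- ===== PORT A =====
-- A's while-loop: sort, and if the minimum is below K pop the two front elements and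
-- append a + b*2; the two IndexError points (scoville[0] on the empty list / the second
-- pop(0) on a one-element list) return a junk value 0 here and are excluded by Pre_solution.
def solutionGoA (K count : Int) (l : List Int) : Int :=
  match h : PySem.List.sorted l (fun x => x) false with
  | [] => 0            -- scoville[0] raises IndexError in Python (outside Pre_)
  | x :: rest =>
    if x < K then
      match rest with
      | [] => 0        -- second pop(0) raises IndexError in Python (outside Pre_)
      | y :: r => solutionGoA K (count + 1) (r ++ [x + y * 2])
    else count + 1
termination_by l.length
decreasing_by
  have hlen : (PySem.List.sorted l (fun x => x) false).length = l.length :=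
    PySem.List.length_sorted l (fun x => x) false
  rw [h] at hlen
  simp at hlen
  simp
  omega

def solution (scoville : List Int) (K : Int) : Int :=
  solutionGoA K (-1) scoville

-- ===== PORT B =====
-- _pop of Source B: the smallest of the two non-decreasing queues; the read positions i, j
-- are ported exactly as the unread suffixes of the two queues (advancing i = dropping the head).
-- The final catch-all (both queues exhausted) is q2[j] = IndexError in Python; it returns
-- junk (0, [], []) here and is excluded by Pre_solution.
def popMinQ (q1 q2 : List Int) : Int × List Int × List Int :=
  match q1, q2 with
  | a :: t1, [] => (a, t1, [])
  | a :: t1, b :: t2 => if a ≤ b then (a, t1, b :: t2) else (b, a :: t1, t2)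
  | [], b :: t2 => (b, [], t2)
  | [], [] => (0, [], [])   -- q2[j] raises IndexError in Python (outside Pre_)

theorem popMinQ_length (q1 q2 : List Int) (h : q1.length + q2.length ≠ 0) :
    (popMinQ q1 q2).2.1.length + (popMinQ q1 q2).2.2.length + 1 = q1.length + q2.length := by
  match q1, q2 with
  | a :: t1, [] => simp [popMinQ]
  | a :: t1, b :: t2 => simp only [popMinQ]; split <;> simp <;> omega
  | [], b :: t2 => simp [popMinQ]
  | [], [] => simp at h

-- Source B's while-loop; the two guards below only make the recursion total: they return
-- junk 0 exactly where _pop raises IndexError in Python (both excluded by Pre_solution).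
def solutionGoB (K : Int) (q1 q2 : List Int) (count : Int) : Int :=
  if h0 : q1.length + q2.length = 0 then 0      -- first _pop raises IndexError (outside Pre_)
  else
    let p := popMinQ q1 q2
    if K ≤ p.1 then count
    else if q1.length + q2.length = 1 then 0    -- second _pop raises IndexError (outside Pre_)
    else
      let p2 := popMinQ p.2.1 p.2.2
      solutionGoB K p2.2.1 (p2.2.2 ++ [p.1 + 2 * p2.1]) (count + 1)
termination_by q1.length + q2.length
decreasing_by
  have h1 := popMinQ_length q1 q2 h0
  have h2 : (popMinQ q1 q2).2.1.length + (popMinQ q1 q2).2.2.length ≠ 0 := by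
    intro hz
    have := popMinQ_length q1 q2 h0
    omega
  have h3 := popMinQ_length (popMinQ q1 q2).2.1 (popMinQ q1 q2).2.2 h2
  simp only [p] at *
  simp
  omega

def solution_alt (scoville : List Int) (K : Int) : Int :=
  solutionGoB K (PySem.List.sorted scoville (fun x => x) false) [] 0

-- ===== PRECONDITION & SPEC =====
-- `mixOk K n pool` decides whether the mixing process started from the sorted `pool`
-- (called with n = pool.length, which drops by exactly one per mix, so this is the
-- precise number of possible mixes, not an arbitrary fuel) ever reaches a state whose
-- minimum is at least K.
def mixOk (K : Int) : Nat → List Int → Bool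
  | 0, _ => false
  | _, [] => false
  | n + 1, a :: rest =>
    if K ≤ a then true
    else
      match rest with
      | [] => false
      | b :: r => mixOk K n (List.orderedInsert (· ≤ ·) (a + 2 * b) r)

-- Pre_solution holds exactly when the mixing process makes every food reach K, i.e. on
-- exactly the inputs where Python A returns; on the excluded inputs A raises IndexError
-- (pop from an empty or one-element pool) and Python B raises IndexError there as well.
-- The excluded set depends on the whole run of accumulated mix values and has no closed
-- form, so it is stated through the one-line process predicate mixOk above.
def Pre_solution (scoville : List Int) (K : Int) : Prop :=
  mixOk K scoville.length (PySem.List.sorted scoville (fun x => x) false) = true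
instance (scoville : List Int) (K : Int) : Decidable (Pre_solution scoville K) := by
  unfold Pre_solution; infer_instance

def pvWitness_solution : List Int × Int := ([1, 2, 7], 5)

def Spec_solution (scoville : List Int) (K : Int) (out : Int) : Prop := out = solution_alt scoville K
instance (scoville : List Int) (K : Int) (out : Int) : Decidable (Spec_solution scoville K out) := by unfold Spec_solution; infer_instance

-- ===== CLAIM (what is proved, stated in full; the proofs are below) =====
def Claim_equal_solution : Prop := ∀ (scoville : List Int) (K : Int), Dom_solution scoville K → Pre_solution scoville K → Spec_solution scoville K (solution scoville K)

-- ===== LEMMAS AND PROOFS =====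

-- value-level facts about one pop: it returns the smallest live value, keeps both
-- queues sorted, and bounds everything that remains.
theorem popMinQ_spec (q1 q2 : List Int)
    (h1 : List.Pairwise (· ≤ ·) q1) (h2 : List.Pairwise (· ≤ ·) q2)
    (hne : q1.length + q2.length ≠ 0) :
    (q1 ++ q2).Perm ((popMinQ q1 q2).1 :: ((popMinQ q1 q2).2.1 ++ (popMinQ q1 q2).2.2)) ∧
    List.Pairwise (· ≤ ·) (popMinQ q1 q2).2.1 ∧
    List.Pairwise (· ≤ ·) (popMinQ q1 q2).2.2 ∧
    (∀ x ∈ (popMinQ q1 q2).2.1 ++ (popMinQ q1 q2).2.2, (popMinQ q1 q2).1 ≤ x) := by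
  match q1, q2 with
  | [], [] => simp at hne
  | a :: t1, [] =>
    simp only [popMinQ]
    refine ⟨by simp, h1.sublist (List.sublist_cons_self _ _), by simp, ?_⟩
    intro x hx
    simp at hx
    exact List.rel_of_pairwise_cons h1 hx
  | [], b :: t2 =>
    simp only [popMinQ]
    refine ⟨by simp, by simp, h2.sublist (List.sublist_cons_self _ _), ?_⟩
    intro x hx
    simp at hx
    exact List.rel_of_pairwise_cons h2 hx
  | a :: t1, b :: t2 =>
    simp only [popMinQ]
    by_cases hab : a ≤ b
    · simp only [if_pos hab]
      refine ⟨by simp, h1.sublist (List.sublist_cons_self _ _), h2, ?_⟩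
      intro x hx
      simp at hx
      rcases hx with hx | hx | hx
      · exact List.rel_of_pairwise_cons h1 hx
      · exact hx ▸ hab
      · exact le_trans hab (List.rel_of_pairwise_cons h2 hx)
    · simp only [if_neg hab]
      push Not at hab
      refine ⟨?_, h1, h2.sublist (List.sublist_cons_self _ _), ?_⟩
      · exact List.perm_middle
      · intro x hx
        simp at hx
        rcases hx with hx | hx | hx
        · exact hx ▸ le_of_lt hab
        · exact (le_of_lt hab).trans (List.rel_of_pairwise_cons h1 hx)
        · exact List.rel_of_pairwise_cons h2 hx

-- structural fact: a pop removes the head of exactly one of the two queues.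
theorem popMinQ_shape (q1 q2 : List Int) (hne : q1.length + q2.length ≠ 0) :
    ((popMinQ q1 q2).2.1 = q1 ∧ q2 = (popMinQ q1 q2).1 :: (popMinQ q1 q2).2.2) ∨
    ((popMinQ q1 q2).2.2 = q2 ∧ q1 = (popMinQ q1 q2).1 :: (popMinQ q1 q2).2.1) := by
  match q1, q2 with
  | [], [] => simp at hne
  | a :: t1, [] => right; simp [popMinQ]
  | [], b :: t2 => left; simp [popMinQ]
  | a :: t1, b :: t2 =>
    simp only [popMinQ]
    by_cases hab : a ≤ b
    · right; simp [if_pos hab]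
    · left; simp [if_neg hab]

-- The loop invariant for the mix queue: every live mix x in q2 was built as u + 2*v with
-- u ≤ v, where v is at most every live original (the ctx list) and at most every mix that
-- precedes x in q2 (folded into ctx as the recursion walks down q2).
def GoodQ2 (ctx : List Int) : List Int → Prop
  | [] => True
  | x :: t => (∃ u v, x = u + 2 * v ∧ u ≤ v ∧ ∀ z ∈ ctx, v ≤ z) ∧ GoodQ2 (x :: ctx) t

theorem goodQ2_mono (t : List Int) : ∀ (S S' : List Int), (∀ z ∈ S', z ∈ S) →
    GoodQ2 S t → GoodQ2 S' t := by
  induction t with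
  | nil => intro S S' _ _; trivial
  | cons x t ih =>
    intro S S' hsub hg
    obtain ⟨⟨u, v, hx, huv, hb⟩, hrest⟩ := hg
    refine ⟨⟨u, v, hx, huv, fun z hz => hb z (hsub z hz)⟩, ?_⟩
    refine ih (x :: S) (x :: S') ?_ hrest
    intro z hz
    rcases List.mem_cons.mp hz with h | h
    · simp [h]
    · simp [hsub z h]

theorem goodQ2_mem (t : List Int) : ∀ (S : List Int) (x : Int), x ∈ t → GoodQ2 S t →
    ∃ u v, x = u + 2 * v ∧ u ≤ v ∧ ∀ z ∈ S, v ≤ z := by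
  induction t with
  | nil => intro S x hx; simp at hx
  | cons y t ih =>
    intro S x hx hg
    obtain ⟨⟨u, v, hy, huv, hb⟩, hrest⟩ := hg
    rcases List.mem_cons.mp hx with h | h
    · exact ⟨u, v, h ▸ hy, huv, hb⟩
    · obtain ⟨u', v', hx', huv', hb'⟩ := ih (y :: S) x h hrest
      exact ⟨u', v', hx', huv', fun z hz => hb' z (by simp [hz])⟩

theorem goodQ2_append (t : List Int) : ∀ (S : List Int) (p q : Int),
    GoodQ2 S t → (∀ z ∈ t, q ≤ z) → (∀ z ∈ S, q ≤ z) → p ≤ q →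
    GoodQ2 S (t ++ [p + 2 * q]) := by
  induction t with
  | nil =>
    intro S p q _ _ hS hpq
    exact ⟨⟨p, q, rfl, hpq, hS⟩, trivial⟩
  | cons x t ih =>
    intro S p q hg ht hS hpq
    obtain ⟨hx, hrest⟩ := hg
    refine ⟨hx, ?_⟩
    exact ih (x :: S) p q hrest (fun z hz => ht z (by simp [hz]))
      (by intro z hz; rcases List.mem_cons.mp hz with h | h
          · exact h ▸ ht x (by simp)
          · exact hS z h) hpq

-- after the two pops, every surviving mix has a witness v below both popped values,
-- and the surviving queues are still GoodQ2-related.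
theorem two_pops_good (q1 q2 : List Int) (hg : GoodQ2 q1 q2)
    (hlen : 2 ≤ q1.length + q2.length) :
    GoodQ2 (popMinQ (popMinQ q1 q2).2.1 (popMinQ q1 q2).2.2).2.1
           (popMinQ (popMinQ q1 q2).2.1 (popMinQ q1 q2).2.2).2.2 ∧
    (∀ x ∈ (popMinQ (popMinQ q1 q2).2.1 (popMinQ q1 q2).2.2).2.2,
      ∃ u v, x = u + 2 * v ∧ u ≤ v ∧ v ≤ (popMinQ q1 q2).1 ∧
        v ≤ (popMinQ (popMinQ q1 q2).2.1 (popMinQ q1 q2).2.2).1) := by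
  have hne1 : q1.length + q2.length ≠ 0 := by omega
  have hl1 := popMinQ_length q1 q2 hne1
  set p := (popMinQ q1 q2).1 with hp
  set r1 := (popMinQ q1 q2).2.1 with hr1
  set r2 := (popMinQ q1 q2).2.2 with hr2
  have hne2 : r1.length + r2.length ≠ 0 := by omega
  have hl2 := popMinQ_length r1 r2 hne2
  set q := (popMinQ r1 r2).1 with hq
  set s1 := (popMinQ r1 r2).2.1 with hs1
  set s2 := (popMinQ r1 r2).2.2 with hs2
  have hsh1 := popMinQ_shape q1 q2 hne1
  have hsh2 := popMinQ_shape r1 r2 hne2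
  simp only [← hp, ← hr1, ← hr2] at hsh1
  simp only [← hq, ← hs1, ← hs2] at hsh2
  rcases hsh1 with ⟨e11, e12⟩ | ⟨e11, e12⟩
  · -- first pop from q2 : q2 = p :: r2, r1 = q1
    have hg' : GoodQ2 (p :: q1) r2 := by
      rw [e12] at hg
      exact hg.2
    rcases hsh2 with ⟨e21, e22⟩ | ⟨e21, e22⟩
    · -- second pop from r2 : r2 = q :: s2, s1 = r1 = q1
      have hg'' : GoodQ2 (q :: p :: q1) s2 := by
        rw [e22] at hg'
        exact hg'.2
      constructor
      · refine goodQ2_mono s2 (q :: p :: q1) s1 ?_ hg''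
        intro z hz
        rw [e21, e11] at hz
        simp [hz]
      · intro x hx
        obtain ⟨u, v, hxe, huv, hb⟩ := goodQ2_mem s2 (q :: p :: q1) x hx hg''
        exact ⟨u, v, hxe, huv, hb p (by simp), hb q (by simp)⟩
    · -- second pop from r1 = q1 : r1 = q :: s1, s2 = r2
      have hgm : GoodQ2 (p :: q1) s2 := by rw [e21]; exact hg'
      constructor
      · refine goodQ2_mono s2 (p :: q1) s1 ?_ hgm
        intro z hz
        have hz' : z ∈ r1 := by rw [e22]; simp [hz]
        rw [e11] at hz'
        simp [hz']
      · intro x hx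
        obtain ⟨u, v, hxe, huv, hb⟩ := goodQ2_mem s2 (p :: q1) x hx hgm
        refine ⟨u, v, hxe, huv, hb p (by simp), hb q ?_⟩
        have hq' : q ∈ r1 := by rw [e22]; simp
        rw [e11] at hq'
        simp [hq']
  · -- first pop from q1 : q1 = p :: r1, r2 = q2
    rcases hsh2 with ⟨e21, e22⟩ | ⟨e21, e22⟩
    · -- second pop from r2 = q2 : q2 = q :: s2, s1 = r1
      have hg' : GoodQ2 (q :: q1) s2 := by
        have hq2 : q2 = q :: s2 := by rw [← e11, e22]
        rw [hq2] at hg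
        exact hg.2
      constructor
      · refine goodQ2_mono s2 (q :: q1) s1 ?_ hg'
        intro z hz
        rw [e21] at hz
        rw [e12]
        simp [hz]
      · intro x hx
        obtain ⟨u, v, hxe, huv, hb⟩ := goodQ2_mem s2 (q :: q1) x hx hg'
        exact ⟨u, v, hxe, huv, hb p (by rw [e12]; simp), hb q (by simp)⟩
    · -- second pop from r1 : r1 = q :: s1, s2 = r2 = q2
      have hgm : GoodQ2 q1 s2 := by rw [e21, e11]; exact hg
      constructor
      · refine goodQ2_mono s2 q1 s1 ?_ hgm
        intro z hz
        rw [e12, e22]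
        simp [hz]
      · intro x hx
        obtain ⟨u, v, hxe, huv, hb⟩ := goodQ2_mem s2 q1 x hx hgm
        exact ⟨u, v, hxe, huv, hb p (by rw [e12]; simp), hb q (by rw [e12, e22]; simp)⟩

theorem goA_step_mix (l : List Int) (K c a y : Int) (r : List Int)
    (hs : PySem.List.sorted l (fun x => x) false = a :: y :: r) (hlt : a < K) :
    solutionGoA K c l = solutionGoA K (c + 1) (r ++ [a + y * 2]) := by
  conv_lhs => rw [solutionGoA]
  split
  next heq => rw [hs] at heq; cases heq
  next x rest heq =>
    rw [hs] at heq
    injection heq with h1 h2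
    subst h1
    rw [if_pos hlt]
    subst h2
    rfl

theorem goA_step_done (l : List Int) (K c a : Int) (rest : List Int)
    (hs : PySem.List.sorted l (fun x => x) false = a :: rest) (hge : ¬ a < K) :
    solutionGoA K c l = c + 1 := by
  conv_lhs => rw [solutionGoA]
  split
  next heq => rw [hs] at heq; cases heq
  next x rest' heq =>
    rw [hs] at heq
    injection heq with h1 h2
    subst h1
    rw [if_neg hge]

theorem goB_step_done (K : Int) (q1 q2 : List Int) (count : Int)
    (hne : q1.length + q2.length ≠ 0) (hK : K ≤ (popMinQ q1 q2).1) :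
    solutionGoB K q1 q2 count = count := by
  rw [solutionGoB]
  rw [dif_neg hne]
  simp only [if_pos hK]

theorem goB_step_mix (K : Int) (q1 q2 : List Int) (count : Int)
    (hne : q1.length + q2.length ≠ 0) (hK : ¬ K ≤ (popMinQ q1 q2).1)
    (h1 : q1.length + q2.length ≠ 1) :
    solutionGoB K q1 q2 count =
      solutionGoB K (popMinQ (popMinQ q1 q2).2.1 (popMinQ q1 q2).2.2).2.1
        ((popMinQ (popMinQ q1 q2).2.1 (popMinQ q1 q2).2.2).2.2 ++
          [(popMinQ q1 q2).1 + 2 * (popMinQ (popMinQ q1 q2).2.1 (popMinQ q1 q2).2.2).1])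
        (count + 1) := by
  rw [solutionGoB]
  rw [dif_neg hne]
  simp only [if_neg hK, if_neg h1]

theorem pairwise_orderedInsert_le (x : Int) (l : List Int) (h : l.Pairwise (· ≤ ·)) :
    (List.orderedInsert (· ≤ ·) x l).Pairwise (· ≤ ·) := by
  induction l with
  | nil => simp
  | cons b t ih =>
    simp only [List.orderedInsert_cons]
    by_cases hxb : x ≤ b
    · simp only [if_pos hxb]
      refine List.pairwise_cons.mpr ⟨?_, h⟩
      intro z hz
      rcases List.mem_cons.mp hz with hz | hz
      · exact hz ▸ hxb
      · exact hxb.trans (List.rel_of_pairwise_cons h hz)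
    · simp only [if_neg hxb]
      refine List.pairwise_cons.mpr ⟨?_, ih (List.pairwise_cons.mp h).2⟩
      intro z hz
      rcases (List.mem_orderedInsert _).mp hz with hz | hz
      · omega
      · exact List.rel_of_pairwise_cons h hz

theorem main_eq (N : Nat) : ∀ (l q1 q2 : List Int) (K c : Int),
    l.length = N →
    l.Perm (q1 ++ q2) →
    List.Pairwise (· ≤ ·) q1 →
    List.Pairwise (· ≤ ·) q2 →
    GoodQ2 q1 q2 →
    mixOk K l.length (PySem.List.sorted l (fun x => x) false) = true →
    solutionGoA K c l = solutionGoB K q1 q2 (c + 1) := by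
  induction N with
  | zero =>
    intro l q1 q2 K c hlen _ _ _ _ hmix
    have hl : l = [] := List.length_eq_zero_iff.mp hlen
    subst hl
    simp [mixOk] at hmix
  | succ n ih =>
    intro l q1 q2 K c hlen hperm hp1 hp2 hgood hmix
    have hne : l ≠ [] := by intro h; subst h; simp at hlen
    obtain ⟨a, rest, hs⟩ : ∃ a rest, PySem.List.sorted l (fun x => x) false = a :: rest := by
      cases hsr : PySem.List.sorted l (fun x => x) false with
      | nil => exact absurd ((PySem.List.sorted_eq_nil_iff l (fun x => x) false).mp hsr) hne
      | cons a rest => exact ⟨a, rest, rfl⟩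
    have hsperm : (PySem.List.sorted l (fun x => x) false).Perm l :=
      PySem.List.sorted_perm l (fun x => x) false
    have hamem : a ∈ l := hsperm.subset (hs ▸ List.mem_cons_self)
    have hamin : ∀ y ∈ l, a ≤ y := PySem.List.key_head_sorted_le l (fun x => x) hs
    have hq12 : q1.length + q2.length = l.length := by
      have := hperm.length_eq; simp at this; omega
    have hq12ne : q1.length + q2.length ≠ 0 := by
      intro h0
      exact hne (List.length_eq_zero_iff.mp (by omega))
    obtain ⟨pm_perm, pm_p1, pm_p2, pm_min⟩ := popMinQ_spec q1 q2 hp1 hp2 hq12ne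
    have hm_mem : (popMinQ q1 q2).1 ∈ l := by
      have : (popMinQ q1 q2).1 ∈ q1 ++ q2 := pm_perm.symm.subset List.mem_cons_self
      exact (hperm.mem_iff).mpr this
    have ham : a = (popMinQ q1 q2).1 := by
      have h1 : a ≤ (popMinQ q1 q2).1 := hamin _ hm_mem
      have h2 : (popMinQ q1 q2).1 ≤ a := by
        have haq : a ∈ (popMinQ q1 q2).1 :: ((popMinQ q1 q2).2.1 ++ (popMinQ q1 q2).2.2) :=
          pm_perm.subset (hperm.subset hamem)
        rcases List.mem_cons.mp haq with h | h
        · exact le_of_eq h.symm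
        · exact pm_min _ h
      exact le_antisymm h1 h2
    -- unfold mixOk once
    have hmix1 : mixOk K l.length (a :: rest) = true := hs ▸ hmix
    have hlpos : l.length = n + 1 := hlen
    by_cases hlt : a < K
    · -- the minimum is below K: both sides mix the two smallest values
      obtain ⟨y, r, hrest⟩ : ∃ y r, rest = y :: r := by
        cases hrest : rest with
        | nil =>
          exfalso
          rw [hlpos, hrest] at hmix1
          simp [mixOk, if_neg (by omega : ¬ K ≤ a)] at hmix1
        | cons y r => exact ⟨y, r, rfl⟩
      subst hrest
      have hspw : List.Pairwise (· ≤ ·) (PySem.List.sorted l (fun x => x) false) := by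
        have := PySem.List.sorted_pairwise l (fun x => x)
        simpa using this
      have hay : a ≤ y := by
        rw [hs] at hspw
        exact List.rel_of_pairwise_cons hspw (by simp)
      have hyr : ∀ x ∈ r, y ≤ x := by
        rw [hs] at hspw
        exact fun x hx => List.rel_of_pairwise_cons (List.Pairwise.of_cons hspw) hx
      -- B's second pop
      have hrr_perm : (y :: r).Perm ((popMinQ q1 q2).2.1 ++ (popMinQ q1 q2).2.2) := by
        have h1 : (a :: y :: r).Perm ((popMinQ q1 q2).1 :: ((popMinQ q1 q2).2.1 ++ (popMinQ q1 q2).2.2)) := by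
          rw [← hs]
          exact hsperm.symm.symm.trans (hperm.trans pm_perm)
        rw [← ham] at h1
        exact h1.cons_inv
      have hr12ne : (popMinQ q1 q2).2.1.length + (popMinQ q1 q2).2.2.length ≠ 0 := by
        have := hrr_perm.length_eq
        simp at this
        omega
      obtain ⟨pm2_perm, pm2_p1, pm2_p2, pm2_min⟩ :=
        popMinQ_spec (popMinQ q1 q2).2.1 (popMinQ q1 q2).2.2 pm_p1 pm_p2 hr12ne
      set m2 := (popMinQ (popMinQ q1 q2).2.1 (popMinQ q1 q2).2.2).1 with hm2def
      set s1 := (popMinQ (popMinQ q1 q2).2.1 (popMinQ q1 q2).2.2).2.1 with hs1def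
      set s2 := (popMinQ (popMinQ q1 q2).2.1 (popMinQ q1 q2).2.2).2.2 with hs2def
      have hm2_mem : m2 ∈ y :: r := hrr_perm.mem_iff.mpr (pm2_perm.symm.subset List.mem_cons_self)
      have hym2 : y = m2 := by
        have h1 : y ≤ m2 := by
          rcases List.mem_cons.mp hm2_mem with h | h
          · exact le_of_eq h.symm
          · exact hyr _ h
        have h2 : m2 ≤ y := by
          have hyq : y ∈ m2 :: (s1 ++ s2) := pm2_perm.subset (hrr_perm.subset List.mem_cons_self)
          rcases List.mem_cons.mp hyq with h | h
          · exact le_of_eq h.symm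
          · exact pm2_min _ h
        exact le_antisymm h1 h2
      -- invariant after the two pops
      obtain ⟨hgood', hwit⟩ := two_pops_good q1 q2 hgood (by
        have hx := hsperm.length_eq
        rw [hs] at hx
        simp at hx
        omega)
      simp only [← hm2def, ← hs1def, ← hs2def] at hgood' hwit
      -- every surviving mix is at most the new mix value
      have hbndm : ∀ x ∈ s2, x ≤ a + 2 * y := by
        intro x hx
        obtain ⟨u, v, hxe, huv, hvp, hvq⟩ := hwit x hx
        rw [← ham] at hvp
        rw [← hym2] at hvq
        omega
      -- the step lemmas
      rw [goA_step_mix l K c a y r hs hlt]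
      have hlr : l.length = r.length + 2 := by
        have := hsperm.length_eq
        rw [hs] at this
        simp at this
        omega
      rw [goB_step_mix K q1 q2 (c + 1) hq12ne (by rw [← ham]; omega) (by
        have := hrr_perm.length_eq; simp at this; omega)]
      rw [← ham, ← hm2def, ← hs1def, ← hs2def, ← hym2]
      -- permutation for the new pool
      have hr_perm : r.Perm (s1 ++ s2) := by
        have h := hrr_perm.trans pm2_perm
        rw [← hym2] at h
        exact h.cons_inv
      have happ : (r ++ [a + y * 2]).Perm (s1 ++ (s2 ++ [a + 2 * y])) := by
        have h2 : (r ++ [a + y * 2]).Perm ((s1 ++ s2) ++ [a + y * 2]) :=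
          hr_perm.append_right _
        have h3 : (s1 ++ s2) ++ [a + y * 2] = s1 ++ (s2 ++ [a + 2 * y]) := by
          rw [List.append_assoc]; ring_nf
        rw [← h3]; exact h2
      -- sortedness of the new mix queue
      have hp2' : List.Pairwise (· ≤ ·) (s2 ++ [a + 2 * y]) := by
        rw [List.pairwise_append]
        refine ⟨pm2_p2, by simp, ?_⟩
        intro x hx z hz
        simp at hz
        subst hz
        exact hbndm x hx
      -- invariant for the new mix queue
      have hall2 : ∀ z ∈ s2, y ≤ z := by
        intro z hz
        rw [hym2]
        exact pm2_min z (by simp [hz])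
      have hall1 : ∀ z ∈ s1, y ≤ z := by
        intro z hz
        rw [hym2]
        exact pm2_min z (by simp [hz])
      have hgood'' : GoodQ2 s1 (s2 ++ [a + 2 * y]) :=
        goodQ2_append s2 s1 a y hgood' hall2 hall1 hay
      -- the process predicate for the new pool
      have hmix' : mixOk K (r ++ [a + y * 2]).length
          (PySem.List.sorted (r ++ [a + y * 2]) (fun x => x) false) = true := by
        have hrpw : List.Pairwise (· ≤ ·) r := by
          rw [hs] at hspw
          exact (List.pairwise_cons.mp (List.pairwise_cons.mp hspw).2).2
        have h1 : (List.orderedInsert (· ≤ ·) (a + 2 * y) r).Perm ((a + 2 * y) :: r) :=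
          List.perm_orderedInsert _ _ r
        have h2 : ((a + 2 * y) :: r).Perm (r ++ [a + y * 2]) := by
          have he : r ++ [a + y * 2] = r ++ [a + 2 * y] := by ring_nf
          rw [he]
          exact (List.perm_append_singleton _ _).symm
        have hopw : List.Pairwise (· ≤ ·) (List.orderedInsert (· ≤ ·) (a + 2 * y) r) :=
          pairwise_orderedInsert_le _ r hrpw
        have hsr : PySem.List.sorted (r ++ [a + y * 2]) (fun x => x) false =
            List.orderedInsert (· ≤ ·) (a + 2 * y) r :=
          PySem.List.sorted_id_eq_of_perm_of_pairwise _ _ (h1.trans h2) hopw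
        rw [hsr]
        rw [hlpos] at hmix1
        have hn : n = r.length + 1 := by omega
        rw [hn] at hmix1
        simp only [mixOk, if_neg (by omega : ¬ K ≤ a)] at hmix1
        have hlnew : (r ++ [a + y * 2]).length = r.length + 1 := by simp
        rw [hlnew]
        exact hmix1
      exact ih (r ++ [a + y * 2]) s1 (s2 ++ [a + 2 * y]) K (c + 1)
        (by simp; omega) happ pm2_p1 hp2' hgood'' hmix'
    · -- the minimum is already ≥ K: both sides stop
      rw [goA_step_done l K c a rest hs hlt]
      rw [goB_step_done K q1 q2 (c + 1) hq12ne (by rw [← ham]; omega)]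

-- ===== VERDICT (by name: the statement is the Claim_ definition above) =====
theorem solution_spec : Claim_equal_solution := by
  unfold Claim_equal_solution
  intro scoville K _ hpre
  unfold Spec_solution solution solution_alt
  unfold Pre_solution at hpre
  have hlen : (PySem.List.sorted scoville (fun x => x) false).length = scoville.length :=
    PySem.List.length_sorted scoville (fun x => x) false
  have h := main_eq scoville.length scoville
    (PySem.List.sorted scoville (fun x => x) false) [] K (-1) rfl
    (by simpa using (PySem.List.sorted_perm scoville (fun x => x) false).symm)
    (by simpa using PySem.List.sorted_pairwise scoville (fun x => x))
    (by simp) trivial hpre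
  simpa using h
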